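-- pv_equiv track=rewrite | github.com/ckithika/joe | agent/risk_profiler.py | _count_revenge_trades
-- ===== SOURCE A (Python) =====
-- def _count_revenge_trades(recent: list[dict]) -> int:
--     stop_dates = {
--         e["date"]
--         for e in recent
--         if e.get("action") == "exit" and e.get("reason") == "stopped_out"
--     }
--     return len(
--         [e for e in recent if e.get("action") == "entry" and e.get("date") in stop_dates]
--     )
-- ===== SOURCE B (Python) =====
-- def _count_revenge_trades(recent: list[dict]) -> int:
--     agg = {}  # date -> [entry count on that date, whether a stop-out exit occurred]
--     for e in recent:
--         d = e.get("date")
--         cnt, stopped = agg.get(d, (0, False))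
--         if e.get("action") == "entry":
--             cnt += 1
--         if e.get("action") == "exit" and e.get("reason") == "stopped_out":
--             stopped = True
--         agg[d] = (cnt, stopped)
--     return sum(cnt for cnt, stopped in agg.values() if stopped)
-- ===== Notes on version B (the rewrite author's own statement) =====
-- stated objective: alternative
-- what changed: Replaces A's two passes (build a set of stop-out dates, then count entries whose date is in it) by a single loop maintaining a per-date table of (entry count, stop-out flag), reduced at the end by summing entry counts of flagged dates.
import Mathlib
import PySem

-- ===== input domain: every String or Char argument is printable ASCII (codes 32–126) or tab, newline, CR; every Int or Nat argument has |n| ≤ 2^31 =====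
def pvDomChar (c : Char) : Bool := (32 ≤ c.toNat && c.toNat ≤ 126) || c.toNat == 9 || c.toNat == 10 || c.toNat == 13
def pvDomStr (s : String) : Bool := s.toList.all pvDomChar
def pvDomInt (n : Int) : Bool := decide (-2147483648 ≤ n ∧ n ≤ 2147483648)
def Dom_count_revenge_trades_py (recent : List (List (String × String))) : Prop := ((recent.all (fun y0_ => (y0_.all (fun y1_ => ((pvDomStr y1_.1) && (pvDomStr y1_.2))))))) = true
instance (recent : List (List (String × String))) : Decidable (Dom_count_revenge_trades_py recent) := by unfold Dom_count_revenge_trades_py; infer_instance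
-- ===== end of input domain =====

-- B replaces A's stop-date set + second filtered pass by a single per-date aggregation
-- table (entry count, stop flag) reduced at the end; objective: alternative one-pass decomposition.

-- shared helpers: e.get(k) on a Python dict modelled as an association list
def pvGet (e : List (String × String)) (k : String) : Option String :=
  (PySem.Dict.mk e).get? k

def pvIsEntry (e : List (String × String)) : Bool := pvGet e "action" == some "entry"

def pvIsStop (e : List (String × String)) : Bool :=
  pvGet e "action" == some "exit" && pvGet e "reason" == some "stopped_out"

-- ===== PORT A =====
-- e["date"] (which raises KeyError when absent) is ported as (pvGet e "date").getD "";
-- Pre_ excludes exactly the inputs where that lookup is none, so the default is never seen.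
-- 'e.get("date") in stop_dates' : None is never in the set of strings, hence the none branch is false.
def count_revenge_trades_py (recent : List (List (String × String))) : Int :=
  let stop_dates : PySem.Set String :=
    PySem.Set.ofList ((recent.filter (fun e => pvIsStop e)).map (fun e => (pvGet e "date").getD ""))
  (((recent.filter (fun e => pvIsEntry e &&
      (match pvGet e "date" with
       | some d => PySem.Set.contains stop_dates d
       | none => false))).length : Int))

-- ===== PORT B =====
def pvStep (agg : PySem.Dict (Option String) (Int × Bool))
    (e : List (String × String)) : PySem.Dict (Option String) (Int × Bool) :=
  agg.insert (pvGet e "date")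
    ((if pvIsEntry e then (agg.getD (pvGet e "date") (0, false)).1 + 1
      else (agg.getD (pvGet e "date") (0, false)).1),
     (if pvIsStop e then true else (agg.getD (pvGet e "date") (0, false)).2))

def count_revenge_trades_py_alt (recent : List (List (String × String))) : Int :=
  let agg := recent.foldl pvStep PySem.Dict.empty
  agg.values.foldl (fun s p => if p.2 then s + p.1 else s) 0

-- ===== PRECONDITION & SPEC =====
-- Pre_ excludes exactly the inputs on which Python A raises KeyError: a stop-out exit record
-- without a "date" key.
def Pre_count_revenge_trades_py (recent : List (List (String × String))) : Prop :=
  ∀ e ∈ recent, pvIsStop e = true → (pvGet e "date").isSome = true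

instance (recent : List (List (String × String))) : Decidable (Pre_count_revenge_trades_py recent) := by
  unfold Pre_count_revenge_trades_py; infer_instance

def pvWitness_count_revenge_trades_py : (List (List (String × String))) :=
  [[("action", "exit"), ("reason", "stopped_out"), ("date", "d1")],
   [("action", "entry"), ("date", "d1")]]

def Spec_count_revenge_trades_py (recent : List (List (String × String))) (out : Int) : Prop :=
  out = count_revenge_trades_py_alt recent

instance (recent : List (List (String × String))) (out : Int) : Decidable (Spec_count_revenge_trades_py recent out) := by
  unfold Spec_count_revenge_trades_py; infer_instance

-- ===== CLAIM (what is proved, stated in full; the proofs are below) =====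
def Claim_equal_count_revenge_trades_py : Prop := ∀ (recent : List (List (String × String))), Dom_count_revenge_trades_py recent → Pre_count_revenge_trades_py recent → Spec_count_revenge_trades_py recent (count_revenge_trades_py recent)

-- ===== LEMMAS AND PROOFS =====

-- entry count / stop flag of a date key over a list
def pvCntE (l : List (List (String × String))) (k : Option String) : Int :=
  ((l.filter (fun e => pvIsEntry e && (pvGet e "date" == k))).length : Int)

def pvHasS (l : List (List (String × String))) (k : Option String) : Bool :=
  l.any (fun e => pvIsStop e && (pvGet e "date" == k))

theorem pvStep_eq (agg : PySem.Dict (Option String) (Int × Bool)) (e : List (String × String)) :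
    pvStep agg e = agg.insert (pvGet e "date")
      ((if pvIsEntry e then (agg.getD (pvGet e "date") (0, false)).1 + 1
        else (agg.getD (pvGet e "date") (0, false)).1),
       (if pvIsStop e then true else (agg.getD (pvGet e "date") (0, false)).2)) := rfl

theorem pvStep_fun_eq : pvStep = fun d x => d.insert (pvGet x "date")
      ((if pvIsEntry x then (d.getD (pvGet x "date") (0, false)).1 + 1
        else (d.getD (pvGet x "date") (0, false)).1),
       (if pvIsStop x then true else (d.getD (pvGet x "date") (0, false)).2)) := rfl

theorem pvFold_getD (l : List (List (String × String)))
    (agg : PySem.Dict (Option String) (Int × Bool)) (k : Option String) :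
    (l.foldl pvStep agg).getD k (0, false) =
      ((agg.getD k (0, false)).1 + pvCntE l k, (agg.getD k (0, false)).2 || pvHasS l k) := by
  induction l generalizing agg with
  | nil => simp [pvCntE, pvHasS]
  | cons e t ih =>
    simp only [List.foldl_cons, ih, pvStep_eq, PySem.Dict.getD_insert]
    by_cases hk : k = pvGet e "date"
    · subst hk
      simp only [pvCntE, pvHasS, List.filter_cons, List.any_cons, beq_self_eq_true,
        Bool.and_true]
      by_cases he : pvIsEntry e = true <;> by_cases hs : pvIsStop e = true <;>
        simp [he, hs, Bool.or_comm] <;> ring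
    · rw [if_neg hk]
      have hbk : (pvGet e "date" == k) = false := by
        simp [beq_eq_false_iff_ne]; exact fun h => hk h.symm
      simp [pvCntE, pvHasS, List.any_cons, hbk]

theorem pvFold_keys (l : List (List (String × String))) :
    (l.foldl pvStep PySem.Dict.empty).keys =
      PySem.Set.ofList (l.map (fun e => pvGet e "date")) := by
  have h := PySem.Dict.keys_foldl_insert_key (l := l)
      (key := fun e => pvGet e "date")
      (f := fun (agg : PySem.Dict (Option String) (Int × Bool)) e =>
        ((if pvIsEntry e then (agg.getD (pvGet e "date") (0, false)).1 + 1
          else (agg.getD (pvGet e "date") (0, false)).1),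
         (if pvIsStop e then true else (agg.getD (pvGet e "date") (0, false)).2)))
      (d := PySem.Dict.empty)
  simp only [PySem.Dict.keys_empty] at h
  rw [PySem.Set.update_nil_left] at h
  rw [pvStep_fun_eq]
  exact h

theorem pvFold_nodup (l : List (List (String × String))) :
    (l.foldl pvStep PySem.Dict.empty).keys.Nodup := by
  have h := PySem.Dict.nodup_keys_foldl_insert_key (l := l)
      (key := fun e => pvGet e "date")
      (f := fun (agg : PySem.Dict (Option String) (Int × Bool)) e =>
        ((if pvIsEntry e then (agg.getD (pvGet e "date") (0, false)).1 + 1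
          else (agg.getD (pvGet e "date") (0, false)).1),
         (if pvIsStop e then true else (agg.getD (pvGet e "date") (0, false)).2)))
      (d := PySem.Dict.empty) (by simp)
  rw [pvStep_fun_eq]
  exact h

-- sum of an indicator over a nodup list containing x is 1
theorem pvSum_indicator {κ : Type} [DecidableEq κ] (K : List κ) (x : κ)
    (hnd : K.Nodup) (hx : x ∈ K) :
    (K.map (fun k => if x = k then (1 : Int) else 0)).sum = 1 := by
  induction K with
  | nil => cases hx
  | cons a t ih =>
    simp only [List.map_cons, List.sum_cons]
    rcases List.mem_cons.mp hx with h | h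
    · subst h
      have : (t.map (fun k => if x = k then (1 : Int) else 0)).sum = 0 := by
        apply List.sum_eq_zero
        intro y hy
        rcases List.mem_map.mp hy with ⟨k, hk, rfl⟩
        have : x ≠ k := fun h => (List.nodup_cons.mp hnd).1 (h ▸ hk)
        simp [this]
      simp [this]
    · have hne : x ≠ a := fun he => (List.nodup_cons.mp hnd).1 (he ▸ h)
      rw [if_neg hne, ih (List.nodup_cons.mp hnd).2 h]
      ring

-- partition of a filtered count by key over a nodup key list covering l'
theorem pvSum_partition (K : List (Option String)) (l' : List (List (String × String)))
    (hnd : K.Nodup) (hcov : ∀ e ∈ l', pvGet e "date" ∈ K) :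
    (K.map (fun k => ((l'.filter (fun e => pvGet e "date" == k)).length : Int))).sum
      = (l'.length : Int) := by
  induction l' with
  | nil => simp
  | cons e t ih =>
    have hcov' : ∀ x ∈ t, pvGet x "date" ∈ K := fun x hx => hcov x (List.mem_cons_of_mem _ hx)
    have step : ∀ k, (( (e :: t).filter (fun e => pvGet e "date" == k)).length : Int)
        = (if pvGet e "date" = k then (1 : Int) else 0)
          + ((t.filter (fun e => pvGet e "date" == k)).length : Int) := by
      intro k
      by_cases h : pvGet e "date" = k
      · simp [h]; ring
      · have : (pvGet e "date" == k) = false := by simpa [beq_eq_false_iff_ne] using h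
        simp [this, h]
    calc (K.map (fun k => (((e :: t).filter (fun e => pvGet e "date" == k)).length : Int))).sum
        = (K.map (fun k => (if pvGet e "date" = k then (1 : Int) else 0)
            + ((t.filter (fun e => pvGet e "date" == k)).length : Int))).sum := by
          congr 1; exact List.map_congr_left (fun k _ => step k)
      _ = (K.map (fun k => if pvGet e "date" = k then (1 : Int) else 0)).sum
            + (K.map (fun k => ((t.filter (fun e => pvGet e "date" == k)).length : Int))).sum := by
          rw [← List.sum_map_add]
      _ = 1 + (t.length : Int) := by
          rw [pvSum_indicator K _ hnd (hcov e (List.mem_cons_self)), ih hcov']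
      _ = ((e :: t).length : Int) := by simp; ring

-- under Pre_, A's membership test at e equals the stop flag of e's date key
theorem pvTest_eq (recent : List (List (String × String)))
    (hpre : Pre_count_revenge_trades_py recent) (e : List (String × String)) :
    (match pvGet e "date" with
     | some d => PySem.Set.contains
         (PySem.Set.ofList ((recent.filter (fun e => pvIsStop e)).map
           (fun e => (pvGet e "date").getD ""))) d
     | none => false)
      = pvHasS recent (pvGet e "date") := by
  cases hd : pvGet e "date" with
  | none =>
    simp only [pvHasS]
    symm
    rw [Bool.eq_false_iff]
    intro h
    rcases List.any_eq_true.mp h with ⟨x, hx, hxp⟩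
    have hs : pvIsStop x = true := ((Bool.and_eq_true _ _).mp hxp).1
    have hb : (pvGet x "date" == none) = true := ((Bool.and_eq_true _ _).mp hxp).2
    have := hpre x hx hs
    rw [eq_of_beq hb] at this
    simp at this
  | some d =>
    simp only []
    rw [Bool.eq_iff_iff]
    constructor
    · intro h
      have hmem : d ∈ (recent.filter (fun e => pvIsStop e)).map
          (fun e => (pvGet e "date").getD "") := by
        have h2 := h
        rw [PySem.Set.contains_iff] at h2
        simpa [PySem.Set.mem_ofList] using h2
      rcases List.mem_map.mp hmem with ⟨x, hx, hxd⟩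
      have hxr : x ∈ recent := List.mem_of_mem_filter hx
      have hs : pvIsStop x = true := by simpa using List.of_mem_filter hx
      have hsome := hpre x hxr hs
      cases hxd' : pvGet x "date" with
      | none => rw [hxd'] at hsome; simp at hsome
      | some dx =>
        rw [hxd'] at hxd; simp at hxd
        apply List.any_eq_true.mpr
        exact ⟨x, hxr, by simp [hs, hxd', hxd]⟩
    · intro h
      rcases List.any_eq_true.mp h with ⟨x, hx, hxp⟩
      have hs : pvIsStop x = true := ((Bool.and_eq_true _ _).mp hxp).1
      have hb : pvGet x "date" = some d := eq_of_beq ((Bool.and_eq_true _ _).mp hxp).2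
      rw [PySem.Set.contains_iff, PySem.Set.mem_ofList]
      apply List.mem_map.mpr
      exact ⟨x, List.mem_filter.mpr ⟨hx, by simpa using hs⟩, by rw [hb]; rfl⟩

theorem pvMain (recent : List (List (String × String)))
    (hpre : Pre_count_revenge_trades_py recent) :
    count_revenge_trades_py recent = count_revenge_trades_py_alt recent := by
  -- B's side: values of the aggregation table
  set K := PySem.Set.ofList (recent.map (fun e => pvGet e "date")) with hK
  have hvals : (recent.foldl pvStep PySem.Dict.empty).values
      = K.map (fun k => (pvCntE recent k, pvHasS recent k)) := by
    have h1 := PySem.Dict.values_eq_map_keys (d := recent.foldl pvStep PySem.Dict.empty)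
      (pvFold_nodup recent) ((0 : Int), false)
    rw [h1, pvFold_keys recent]
    apply List.map_congr_left
    intro k _
    rw [pvFold_getD recent PySem.Dict.empty k]
    simp
  have hB : count_revenge_trades_py_alt recent
      = (K.map (fun k => if pvHasS recent k then pvCntE recent k else 0)).sum := by
    show (recent.foldl pvStep PySem.Dict.empty).values.foldl
        (fun s p => if p.2 then s + p.1 else s) 0 = _
    rw [hvals, List.foldl_map]
    have hcg := PySem.List.foldl_congr_mem (l := K)
      (f := fun s k => if (pvCntE recent k, pvHasS recent k).2 then s + (pvCntE recent k, pvHasS recent k).1 else s)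
      (g := fun s k => s + (if pvHasS recent k then pvCntE recent k else 0))
      (init := (0 : Int))
      (by intro acc k _; by_cases h : pvHasS recent k <;> simp [h])
    rw [hcg, PySem.List.foldl_add]
    simp
  -- A's side
  have hA : count_revenge_trades_py recent
      = ((recent.filter (fun e => pvIsEntry e && pvHasS recent (pvGet e "date"))).length : Int) := by
    show ((recent.filter _).length : Int) = _
    congr 2
    apply List.filter_congr
    intro e _
    rw [pvTest_eq recent hpre e]
  rw [hA, hB]
  -- pointwise: restrict the k-th term to the k-group of the good filter
  have hterm : ∀ k, (if pvHasS recent k then pvCntE recent k else 0)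
      = (((recent.filter (fun e => pvIsEntry e && pvHasS recent (pvGet e "date"))).filter
          (fun e => pvGet e "date" == k)).length : Int) := by
    intro k
    by_cases h : pvHasS recent k
    · rw [if_pos h]
      unfold pvCntE
      rw [List.filter_filter]
      congr 2
      apply List.filter_congr
      intro e _
      by_cases hk : pvGet e "date" = k
      · simp [hk, h, Bool.and_comm]
      · have : (pvGet e "date" == k) = false := by simpa [beq_eq_false_iff_ne] using hk
        simp [this]
    · rw [if_neg h]
      symm
      rw [List.filter_filter]
      norm_cast
      rw [List.length_eq_zero_iff]
      apply List.filter_eq_nil_iff.mpr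
      intro e _
      intro hcon
      have h1 := (Bool.and_eq_true _ _).mp hcon
      have hkey : pvGet e "date" = k := eq_of_beq h1.1
      have : pvHasS recent (pvGet e "date") = true := ((Bool.and_eq_true _ _).mp h1.2).2
      rw [hkey] at this
      exact h this
  calc ((recent.filter (fun e => pvIsEntry e && pvHasS recent (pvGet e "date"))).length : Int)
      = (K.map (fun k => (((recent.filter (fun e => pvIsEntry e && pvHasS recent (pvGet e "date"))).filter
          (fun e => pvGet e "date" == k)).length : Int))).sum := by
        symm
        apply pvSum_partition K _ (PySem.Set.nodup_ofList _)
        intro e he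
        rw [hK, PySem.Set.mem_ofList]
        exact List.mem_map.mpr ⟨e, List.mem_of_mem_filter he, rfl⟩
    _ = (K.map (fun k => if pvHasS recent k then pvCntE recent k else 0)).sum := by
        congr 1
        exact List.map_congr_left (fun k _ => (hterm k).symm)

-- ===== VERDICT (by name: the statement is the Claim_ definition above) =====
theorem count_revenge_trades_py_spec : Claim_equal_count_revenge_trades_py := by
  intro recent _ hpre
  unfold Spec_count_revenge_trades_py
  exact pvMain recent hpre
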